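-- pv_equiv track=rewrite | github.com/MdAbedin/binarysearch | 0201 - 0300/0207 Longest 1s After One Swap.py | solve
-- ===== SOURCE A (Python) =====
-- def solve(s):
--     l_streaks = [0]
--     for i in range(len(s)):
--         if s[i] == "1":
--             l_streaks.append(l_streaks[-1]+1)
--         else:
--             l_streaks.append(0)
--
--     r_streaks = [0]
--     for i in range(len(s)-1,-1,-1):
--         if s[i] == "1":
--             r_streaks.append(r_streaks[-1]+1)
--         else:
--             r_streaks.append(0)
--
--     r_streaks.reverse()
--
--     if "1" not in s:
--         return 0
--
--     first_1 = s.find("1")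
--     last_1 = s.rfind("1")
--     ans = max(s.find("0"), len(s)-1-s.rfind("0"))
--
--     for i in range(len(s)):
--         if s[i] == "0":
--             if i-l_streaks[i] > first_1:
--                 ans = max(ans, l_streaks[i]+r_streaks[i+1]+1)
--             else:
--                 if i+r_streaks[i+1] < last_1:
--                     ans = max(ans, l_streaks[i]+r_streaks[i+1]+1)
--                 else:
--                     ans = max(ans, l_streaks[i]+r_streaks[i+1])
--
--     return ans
-- ===== SOURCE B (Python) =====
-- def solve(s):
--     n = len(s)
--     total = s.count("1")
--     if total == 0:
--         return 0
--     ans = max(s.find("0"), n - 1 - s.rfind("0"))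
--     best = 0
--     pend = -1   # ones immediately left of the most recent '0', if that '0' is still adjacent to the current run; else -1
--     run = 0     # length of the current 1-run
--     for c in s:
--         if c == "1":
--             run += 1
--             if pend >= 0:
--                 best = max(best, min(pend + run + 1, total))
--         elif c == "0":
--             best = max(best, min(run + 1, total))
--             pend = run
--             run = 0
--         else:
--             pend = -1
--             run = 0
--     return max(ans, best)
-- ===== Notes on version B (the rewrite author's own statement) =====
-- stated objective: simpler
-- what changed: Replaces the two precomputed streak arrays, the reverse pass and the first_1/last_1 index-comparison branches with a single left-to-right pass that keeps (best, ones-before-the-pending-zero, current-run) and caps each candidate window by the total number of ones.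
import Mathlib
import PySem

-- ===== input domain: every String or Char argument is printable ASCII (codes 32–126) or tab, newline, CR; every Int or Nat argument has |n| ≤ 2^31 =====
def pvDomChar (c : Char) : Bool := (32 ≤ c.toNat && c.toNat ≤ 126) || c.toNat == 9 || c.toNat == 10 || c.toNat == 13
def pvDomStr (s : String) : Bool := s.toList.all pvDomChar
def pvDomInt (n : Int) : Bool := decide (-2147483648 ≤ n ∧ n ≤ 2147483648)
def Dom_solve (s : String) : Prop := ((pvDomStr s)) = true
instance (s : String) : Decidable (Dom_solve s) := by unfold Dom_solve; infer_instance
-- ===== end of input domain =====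

-- B replaces A's two streak arrays, reverse pass and first_1/last_1 index comparisons by a single
-- left-to-right pass keeping (best, ones before the pending zero, current run), capping each
-- candidate window by the total count of ones (objective: simpler, O(1) extra space).

-- ===== PORT A =====
def solve (s : String) : Int :=
  let n : Int := PySem.Str.len s
  let l_streaks : List Int :=
    (PySem.List.pyRange 0 n 1).foldl (fun l i =>
      if PySem.Str.pyGet? s i = some '1' then l ++ [PySem.List.pyGetD l (-1) 0 + 1]
      else l ++ [0]) [0]
  let r_streaks : List Int :=
    (PySem.List.pyRange (n - 1) (-1) (-1)).foldl (fun r i =>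
      if PySem.Str.pyGet? s i = some '1' then r ++ [PySem.List.pyGetD r (-1) 0 + 1]
      else r ++ [0]) [0]
  let r_streaks := r_streaks.reverse
  if PySem.Str.isIn "1" s = false then 0
  else
    let first_1 := PySem.Str.find s "1"
    let last_1 := PySem.Str.rfind s "1"
    let ans := max (PySem.Str.find s "0") (n - 1 - PySem.Str.rfind s "0")
    (PySem.List.pyRange 0 n 1).foldl (fun a i =>
      if PySem.Str.pyGet? s i = some '0' then
        if i - PySem.List.pyGetD l_streaks i 0 > first_1 then
          max a (PySem.List.pyGetD l_streaks i 0 + PySem.List.pyGetD r_streaks (i + 1) 0 + 1)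
        else if i + PySem.List.pyGetD r_streaks (i + 1) 0 < last_1 then
          max a (PySem.List.pyGetD l_streaks i 0 + PySem.List.pyGetD r_streaks (i + 1) 0 + 1)
        else
          max a (PySem.List.pyGetD l_streaks i 0 + PySem.List.pyGetD r_streaks (i + 1) 0)
      else a) ans

-- ===== PORT B =====
def solve_alt (s : String) : Int :=
  let n : Int := PySem.Str.len s
  let total : Int := (PySem.Str.count s "1" : Int)
  if total = 0 then 0
  else
    let ans := max (PySem.Str.find s "0") (n - 1 - PySem.Str.rfind s "0")
    let st := s.toList.foldl (fun (st : Int × Int × Int) c =>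
      if c = '1' then
        let run := st.2.2 + 1
        (if st.2.1 ≥ 0 then max st.1 (min (st.2.1 + run + 1) total) else st.1, st.2.1, run)
      else if c = '0' then
        (max st.1 (min (st.2.2 + 1) total), st.2.2, 0)
      else (st.1, -1, 0)) (0, -1, 0)
    max ans st.1

-- ===== PRECONDITION & SPEC =====
def Spec_solve (s : String) (out : Int) : Prop := out = solve_alt s
instance (s : String) (out : Int) : Decidable (Spec_solve s out) := by unfold Spec_solve; infer_instance

-- ===== CLAIM (what is proved, stated in full; the proofs are below) =====
def Claim_equal_solve : Prop := ∀ (s : String), Dom_solve s → Spec_solve s (solve s)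

-- ===== LEMMAS AND PROOFS =====

def rrun (v : List Char) : Nat := (v.takeWhile (· == '1')).length
def lrun (p : List Char) : Nat := rrun p.reverse

theorem rrun_nil : rrun [] = 0 := rfl
theorem rrun_cons (c : Char) (v : List Char) :
    rrun (c :: v) = if c = '1' then rrun v + 1 else 0 := by
  simp [rrun, List.takeWhile_cons]
  split_ifs with h <;> simp_all

theorem rrun_le_length (v : List Char) : rrun v ≤ v.length := by
  simpa [rrun] using List.takeWhile_sublist (l := v) (p := (· == '1')) |>.length_le

theorem rrun_eq_length_iff (v : List Char) : rrun v = v.length ↔ ∀ c ∈ v, c = '1' := by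
  induction v with
  | nil => simp [rrun_nil]
  | cons c v ih =>
    rw [rrun_cons]
    split_ifs with h
    · simp only [List.length_cons, Nat.add_right_cancel_iff, ih, List.mem_cons]
      constructor
      · rintro ha d (rfl | hd); exact h; exact ha d hd
      · intro ha d hd; exact ha d (Or.inr hd)
    · constructor
      · intro h0; exfalso; have := rrun_le_length v; simp only [List.length_cons] at h0; omega
      · intro ha; exact absurd (ha c (by simp)) h

theorem rrun_getElem? (v : List Char) (j : Nat) (hj : j < rrun v) : v[j]? = some '1' := by
  induction v generalizing j with
  | nil => simp [rrun_nil] at hj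
  | cons c v ih =>
    rw [rrun_cons] at hj
    split_ifs at hj with h
    · cases j with
      | zero => simp [h]
      | succ j => simpa using ih j (by omega)
    · omega

theorem rrun_append (v : List Char) (c : Char) :
    rrun (v ++ [c]) = if c = '1' ∧ rrun v = v.length then rrun v + 1 else rrun v := by
  induction v with
  | nil => simp [rrun_nil, rrun_cons]
  | cons d v ih =>
    rw [List.cons_append, rrun_cons, rrun_cons, ih]
    by_cases hd : d = '1' <;> by_cases hc : c = '1' <;> by_cases he : rrun v = v.length <;>
      simp [hd, hc, he]

theorem lrun_nil : lrun [] = 0 := rfl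

theorem lrun_le_length (p : List Char) : lrun p ≤ p.length := by
  simpa [lrun] using rrun_le_length p.reverse

theorem lrun_append (p : List Char) (c : Char) :
    lrun (p ++ [c]) = if c = '1' then lrun p + 1 else 0 := by
  simp [lrun, List.reverse_append, rrun_cons]

theorem lrun_getElem? (p : List Char) (j : Nat) (h1 : p.length - lrun p ≤ j) (h2 : j < p.length) :
    p[j]? = some '1' := by
  have h3 : p.length - 1 - j < rrun p.reverse := by
    have := rrun_le_length p.reverse
    simp only [List.length_reverse] at this
    simp only [lrun] at h1
    omega
  have := rrun_getElem? p.reverse (p.length - 1 - j) h3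
  rw [List.getElem?_reverse (by omega)] at this
  simpa [show p.length - 1 - (p.length - 1 - j) = j by omega] using this

theorem lrun_take_eq (p : List Char) (c : Char) (k : Nat) (hk : k ≤ p.length) :
    lrun ((p ++ [c]).take k) = lrun (p.take k) := by
  rw [List.take_append_of_le_length hk]

theorem singleton_prefix_iff (v : List Char) (c : Char) : [c] <+: v ↔ v.head? = some c := by
  cases v with
  | nil => simp
  | cons d t => simp [List.cons_prefix_cons, eq_comm]

theorem singleton_prefix_drop_iff (cs : List Char) (c : Char) (j : Nat) :
    [c] <+: cs.drop j ↔ cs[j]? = some c := by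
  rw [singleton_prefix_iff, List.head?_drop]

theorem singleton_infix_iff (cs : List Char) (c : Char) : [c] <:+: cs ↔ c ∈ cs := by
  constructor
  · rintro ⟨u, v, rfl⟩; simp
  · intro h
    obtain ⟨j, hj, rfl⟩ := List.getElem_of_mem h
    have : [cs[j]] <+: cs.drop j := by
      rw [singleton_prefix_drop_iff]; exact List.getElem?_eq_getElem hj
    exact this.isInfix.trans (List.drop_suffix j cs).isInfix

theorem find1_spec (cs : List Char) (c : Char) (h1 : c ∈ cs) :
    0 ≤ PySem.Chars.find cs [c] ∧ (PySem.Chars.find cs [c]).toNat < cs.length ∧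
      cs[(PySem.Chars.find cs [c]).toNat]? = some c ∧
      ∀ j : Nat, j < (PySem.Chars.find cs [c]).toNat → cs[j]? ≠ some c := by
  have hnn : 0 ≤ PySem.Chars.find cs [c] :=
    (PySem.Chars.find_nonneg_iff cs [c]).2 ((singleton_infix_iff cs c).2 h1)
  obtain ⟨hpre, hmin⟩ := PySem.Chars.find_spec hnn
  rw [singleton_prefix_drop_iff] at hpre
  refine ⟨hnn, ?_, hpre, fun j hj hc => hmin j hj ((singleton_prefix_drop_iff cs c j).2 hc)⟩
  by_contra h
  rw [List.getElem?_eq_none_iff.2 (by omega)] at hpre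
  simp at hpre

theorem find1_lt_iff (cs : List Char) (c : Char) (h1 : c ∈ cs) (m : Nat) :
    PySem.Chars.find cs [c] < (m : Int) ↔ c ∈ cs.take m := by
  obtain ⟨hnn, hlt, hget, hmin⟩ := find1_spec cs c h1
  constructor
  · intro hm
    have : (PySem.Chars.find cs [c]).toNat < m := by omega
    exact List.mem_take_iff_getElem.2 ⟨(PySem.Chars.find cs [c]).toNat, by omega,
      by have := hget; rw [List.getElem?_eq_getElem (by omega)] at this; simpa using this⟩
  · intro hm
    obtain ⟨j, hj, rfl⟩ := List.mem_take_iff_getElem.1 hm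
    by_contra hc
    exact hmin j (by omega) (List.getElem?_eq_getElem (by omega))

theorem rfind_go_zero (s sub : List Char) :
    PySem.Chars.rfind.go s sub 0 = if sub.isPrefixOf s then 0 else -1 := by
  rw [PySem.Chars.rfind.go]

theorem rfind_go_succ (s sub : List Char) (j : Nat) :
    PySem.Chars.rfind.go s sub (j + 1) =
      if sub.isPrefixOf (s.drop (j + 1)) then ((j : Int) + 1) else PySem.Chars.rfind.go s sub j := by
  rw [PySem.Chars.rfind.go]
  push_cast
  rfl

theorem rfind_go_spec (s sub : List Char) (m : Nat) :
    (PySem.Chars.rfind.go s sub m = -1 ∧ ∀ j : Nat, j ≤ m → ¬ sub <+: s.drop j) ∨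
    (∃ j : Nat, j ≤ m ∧ PySem.Chars.rfind.go s sub m = (j : Int) ∧ sub <+: s.drop j ∧
      ∀ j' : Nat, j < j' → j' ≤ m → ¬ sub <+: s.drop j') := by
  induction m with
  | zero =>
    rw [rfind_go_zero]
    by_cases h : sub.isPrefixOf s
    · right
      exact ⟨0, le_refl 0, by simp [h], by simpa using List.isPrefixOf_iff_prefix.1 h, by omega⟩
    · left
      refine ⟨by simp [h], fun j hj => ?_⟩
      interval_cases j
      simpa using fun hc => h (List.isPrefixOf_iff_prefix.2 hc)
  | succ m ih =>
    rw [rfind_go_succ]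
    by_cases h : sub.isPrefixOf (s.drop (m + 1))
    · right
      exact ⟨m + 1, le_refl _, by simp [h], List.isPrefixOf_iff_prefix.1 h, by omega⟩
    · have hnot : ¬ sub <+: s.drop (m + 1) := fun hc => h (List.isPrefixOf_iff_prefix.2 hc)
      rcases ih with ⟨he, hall⟩ | ⟨j, hj, he, hp, hmax⟩
      · left
        refine ⟨by simp [h, he], fun j hj => ?_⟩
        rcases Nat.lt_succ_iff_lt_or_eq.1 (Nat.lt_succ_of_le hj) with hj' | rfl
        · exact hall j (by omega)
        · exact hnot
      · right
        refine ⟨j, by omega, by simp [h, he], hp, fun j' h1 h2 => ?_⟩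
        rcases Nat.lt_succ_iff_lt_or_eq.1 (Nat.lt_succ_of_le h2) with hj' | rfl
        · exact hmax j' h1 (by omega)
        · exact hnot

theorem rfind1_spec (cs : List Char) (c : Char) (h1 : c ∈ cs) :
    0 ≤ PySem.Chars.rfind cs [c] ∧ (PySem.Chars.rfind cs [c]).toNat < cs.length ∧
      cs[(PySem.Chars.rfind cs [c]).toNat]? = some c ∧
      ∀ j : Nat, (PySem.Chars.rfind cs [c]).toNat < j → cs[j]? ≠ some c := by
  obtain ⟨j0, hj0, rfl⟩ := List.getElem_of_mem h1
  have hpre : [cs[j0]] <+: cs.drop j0 :=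
    (singleton_prefix_drop_iff cs _ j0).2 (List.getElem?_eq_getElem hj0)
  rcases rfind_go_spec cs [cs[j0]] cs.length with ⟨_, hall⟩ | ⟨j, hj, he, hp, hmax⟩
  · exact absurd hpre (hall j0 (by omega))
  · rw [singleton_prefix_drop_iff] at hp
    have hjlt : j < cs.length := by
      by_contra hc
      rw [List.getElem?_eq_none_iff.2 (by omega)] at hp
      simp at hp
    have hrw : PySem.Chars.rfind cs [cs[j0]] = (j : Int) := he
    rw [hrw]
    refine ⟨by omega, by simpa using hjlt, by simpa using hp, fun j' hj' hc => ?_⟩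
    by_cases hlen : j' ≤ cs.length
    · exact hmax j' (by simpa using hj') hlen ((singleton_prefix_drop_iff cs _ j').2 hc)
    · rw [List.getElem?_eq_none_iff.2 (by omega)] at hc
      simp at hc

theorem rfind1_gt_iff (cs : List Char) (c : Char) (h1 : c ∈ cs) (m : Nat) :
    (m : Int) < PySem.Chars.rfind cs [c] ↔ c ∈ cs.drop (m + 1) := by
  obtain ⟨hnn, hlt, hget, hmax⟩ := rfind1_spec cs c h1
  constructor
  · intro hm
    have hgt : m + 1 ≤ (PySem.Chars.rfind cs [c]).toNat := by omega
    refine List.mem_iff_getElem.2 ⟨(PySem.Chars.rfind cs [c]).toNat - (m + 1), by simp; omega, ?_⟩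
    rw [List.getElem_drop]
    rw [List.getElem?_eq_getElem (by omega)] at hget
    simp only [Option.some_inj] at hget
    simp only [show m + 1 + ((PySem.Chars.rfind cs [c]).toNat - (m + 1)) = (PySem.Chars.rfind cs [c]).toNat by omega]
    exact hget
  · intro hm
    obtain ⟨i, hi, hgi⟩ := List.mem_iff_getElem.1 hm
    rw [List.getElem_drop] at hgi
    by_contra hc
    exact hmax (m + 1 + i) (by omega) (by rw [List.getElem?_eq_getElem (by simp at hi; omega)]; simp [hgi])

theorem count_go_singleton (c : Char) (l : List Char) (fuel acc : Nat) (hf : l.length ≤ fuel) :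
    PySem.Chars.count.go [c] fuel l acc = acc + l.count c := by
  induction l generalizing fuel acc with
  | nil =>
    cases fuel <;> rw [PySem.Chars.count.go] <;> simp
  | cons h t ih =>
    cases fuel with
    | zero => simp at hf
    | succ f =>
      rw [PySem.Chars.count.go]
      by_cases hc : h = c
      · have hp : [c].isPrefixOf (h :: t) = true := by
          simp [hc]
        simp only [hp, if_true, List.length_cons, List.length_nil, Nat.zero_add,
          List.drop_succ_cons, List.drop_zero]
        rw [ih f (acc + 1) (by simpa using hf)]
        simp [hc]
        omega
      · have hp : [c].isPrefixOf (h :: t) = false := by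
          simp only [Bool.eq_false_iff, ne_eq, List.isPrefixOf_iff_prefix, List.cons_prefix_cons]
          rintro ⟨h', -⟩; exact hc h'.symm
        rw [if_neg (by simp [hp])]
        rw [ih f acc (by simpa using hf)]
        rw [List.count_cons]
        simp [show ¬ (h == c) from by simpa using hc]

theorem count1_eq (cs : List Char) (c : Char) :
    PySem.Chars.count cs [c] = cs.count c := by
  rw [PySem.Chars.count]
  simp only [List.isEmpty_cons, if_false, Bool.false_eq_true]
  simpa using count_go_singleton c cs cs.length 0 (le_refl _)

theorem count_split (cs : List Char) (k : Nat) (h0 : cs[k]? = some '0') :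
    cs.count '1' = (cs.take (k - lrun (cs.take k))).count '1' + lrun (cs.take k) +
      rrun (cs.drop (k + 1)) + (cs.drop (k + 1 + rrun (cs.drop (k + 1)))).count '1' := by
  have hk : k < cs.length := by
    by_contra hc
    rw [List.getElem?_eq_none_iff.2 (by omega)] at h0
    simp at h0
  set p := cs.take k with hp
  set L := lrun p with hL
  have hplen : p.length = k := by simp [hp]; omega
  have hLk : L ≤ k := hplen ▸ lrun_le_length p
  set v := cs.drop (k + 1) with hv
  set R := rrun v with hR
  have hvlen : v.length = cs.length - (k + 1) := by simp [hv]
  have hRle : R ≤ v.length := rrun_le_length v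
  -- count cs = count p + count (drop k cs)
  have e1 : cs.count '1' = p.count '1' + (cs.drop k).count '1' := by
    conv_lhs => rw [← List.take_append_drop k cs]
    rw [List.count_append]
  -- count p = count (take (k - L) cs) + L
  have e2 : p.count '1' = (cs.take (k - L)).count '1' + L := by
    conv_lhs => rw [← List.take_append_drop (k - L) p]
    rw [List.count_append]
    congr 1
    · rw [hp, List.take_take, show min (k - L) k = k - L by omega]
    · have hall : ∀ c ∈ p.drop (k - L), c = '1' := by
        intro c hc
        obtain ⟨i, hi, rfl⟩ := List.mem_iff_getElem.1 hc
        rw [List.getElem_drop]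
        have h9 := lrun_getElem? p (k - L + i) (by omega) (by simp at hi; omega)
        rw [List.getElem?_eq_getElem (by simp at hi; omega)] at h9
        simpa using h9
      rw [(List.count_eq_length).2 (fun b hb => (hall b hb).symm)]
      rw [List.length_drop, hplen]
      omega
  -- count (drop k cs) = count v
  have e3 : (cs.drop k).count '1' = v.count '1' := by
    rw [List.drop_eq_getElem_cons hk, List.count_cons]
    rw [List.getElem?_eq_getElem hk] at h0
    simp only [Option.some_inj] at h0
    simp [h0, hv]
  -- count v = R + count (drop (k+1+R) cs)
  have e4 : v.count '1' = R + (cs.drop (k + 1 + R)).count '1' := by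
    conv_lhs => rw [← List.take_append_drop R v]
    rw [List.count_append]
    congr 1
    · have hall : ∀ c ∈ v.take R, c = '1' := by
        intro c hc
        obtain ⟨i, hi, rfl⟩ := List.mem_iff_getElem.1 hc
        rw [List.getElem_take]
        have h9 := rrun_getElem? v i (by simp at hi; omega)
        rw [List.getElem?_eq_getElem (by simp at hi; omega)] at h9
        simpa using h9
      rw [(List.count_eq_length).2 (fun b hb => (hall b hb).symm)]
      simp
      omega
    · rw [hv, List.drop_drop]
  omega

theorem cand_core (cs : List Char) (k : Nat) (h0 : cs[k]? = some '0') (h1 : '1' ∈ cs) :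
    lrun (cs.take k) + rrun (cs.drop (k + 1)) ≤ cs.count '1' ∧
    (((k : Int) - lrun (cs.take k) > PySem.Chars.find cs ['1'] ∨
      (k : Int) + rrun (cs.drop (k + 1)) < PySem.Chars.rfind cs ['1']) ↔
      lrun (cs.take k) + rrun (cs.drop (k + 1)) < cs.count '1') := by
  have hk : k < cs.length := by
    by_contra hc
    rw [List.getElem?_eq_none_iff.2 (by omega)] at h0
    simp at h0
  have hLk : lrun (cs.take k) ≤ k := by
    have := lrun_le_length (cs.take k)
    simp at this
    omega
  have hsplit := count_split cs k h0
  constructor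
  · omega
  · have hfind : (k : Int) - lrun (cs.take k) > PySem.Chars.find cs ['1'] ↔
        '1' ∈ cs.take (k - lrun (cs.take k)) := by
      rw [← find1_lt_iff cs '1' h1 (k - lrun (cs.take k))]
      push_cast [Nat.cast_sub hLk]
      omega
    have hrfind : (k : Int) + rrun (cs.drop (k + 1)) < PySem.Chars.rfind cs ['1'] ↔
        '1' ∈ cs.drop (k + rrun (cs.drop (k + 1)) + 1) := by
      rw [← rfind1_gt_iff cs '1' h1 (k + rrun (cs.drop (k + 1)))]
      push_cast
      omega
    rw [hfind, hrfind, ← List.count_pos_iff, ← List.count_pos_iff]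
    rw [show k + rrun (cs.drop (k + 1)) + 1 = k + 1 + rrun (cs.drop (k + 1)) by omega]
    omega

def pendV (p : List Char) : Int :=
  if lrun p + 1 ≤ p.length ∧ p[p.length - lrun p - 1]? = some '0'
  then (lrun (p.take (p.length - lrun p - 1)) : Int) else -1

def candAt (cs : List Char) (T : Int) (k : Nat) : Int :=
  min ((lrun (cs.take k) : Int) + (rrun (cs.drop (k + 1)) : Int) + 1) T

def zcands (cs : List Char) (T : Int) : List Int :=
  (List.range cs.length).filterMap
    (fun k => if cs[k]? = some '0' then some (candAt cs T k) else none)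

theorem pendV_nonneg_iff (p : List Char) :
    0 ≤ pendV p ↔ (lrun p + 1 ≤ p.length ∧ p[p.length - lrun p - 1]? = some '0') := by
  unfold pendV
  split_ifs with h
  · simpa using h
  · simpa using h

theorem rrun_ge (v : List Char) (t : Nat) (h : ∀ j, j < t → v[j]? = some '1') (ht : t ≤ v.length) :
    t ≤ rrun v := by
  induction v generalizing t with
  | nil => rw [rrun_nil]; simpa using ht
  | cons c w ih =>
    cases t with
    | zero => omega
    | succ t =>
      have hc : c = '1' := by have := h 0 (by omega); simpa using this
      rw [rrun_cons, if_pos hc]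
      have := ih t (fun j hj => by have := h (j + 1) (by omega); simpa using this) (by simpa using ht)
      omega

theorem rrun_le_of_ne (v : List Char) (t : Nat) (h : v[t]? ≠ some '1') (_ht : t < v.length) :
    rrun v ≤ t := by
  by_contra hc
  exact h (rrun_getElem? v t (by omega))

theorem lrun_ge (p : List Char) (t : Nat) (ht : t ≤ p.length)
    (h : ∀ j, p.length - t ≤ j → j < p.length → p[j]? = some '1') : t ≤ lrun p := by
  refine rrun_ge p.reverse t (fun j hj => ?_) (by simpa using ht)
  rw [List.getElem?_reverse (by omega)]
  exact h (p.length - 1 - j) (by omega) (by omega)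

theorem lrun_le_of_ne (p : List Char) (t : Nat) (h : p[p.length - t - 1]? ≠ some '1')
    (ht : t < p.length) : lrun p ≤ t := by
  refine rrun_le_of_ne p.reverse t (fun hc => h ?_) (by simpa using ht)
  rw [List.getElem?_reverse (by omega)] at hc
  simpa [show p.length - 1 - t = p.length - t - 1 by omega] using hc

theorem pendV_append_one (p : List Char) : pendV (p ++ ['1']) = pendV p := by
  unfold pendV
  rw [lrun_append, if_pos rfl]
  simp only [List.length_append, List.length_cons, List.length_nil]
  by_cases h : lrun p + 1 ≤ p.length
  · have hidx : p.length + 1 - (lrun p + 1) - 1 = p.length - lrun p - 1 := by omega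
    rw [hidx]
    rw [List.getElem?_append_left (by omega)]
    rw [List.take_append_of_le_length (by omega)]
    split_ifs with h1 h2 h3 <;> simp_all
  · rw [if_neg (by omega), if_neg (by omega)]

theorem pendV_append_zero (p : List Char) : pendV (p ++ ['0']) = (lrun p : Int) := by
  have hl : lrun (p ++ ['0']) = 0 := by rw [lrun_append]; simp
  unfold pendV
  rw [hl]
  simp only [List.length_append, List.length_cons, List.length_nil]
  rw [if_pos]
  · rw [show p.length + 1 - 0 - 1 = p.length by omega, List.take_left']
    rfl
  · constructor
    · omega
    · rw [show p.length + 1 - 0 - 1 = p.length by omega]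
      exact List.getElem?_concat_length

theorem pendV_append_other (p : List Char) (c : Char) (hc1 : c ≠ '1') (hc0 : c ≠ '0') :
    pendV (p ++ [c]) = -1 := by
  have hl : lrun (p ++ [c]) = 0 := by rw [lrun_append]; simp [hc1]
  unfold pendV
  rw [hl]
  simp only [List.length_append, List.length_cons, List.length_nil]
  rw [if_neg]
  rintro ⟨-, hget⟩
  rw [show p.length + 1 - 0 - 1 = p.length by omega, List.getElem?_concat_length] at hget
  exact hc0 (by simpa using hget)

theorem candAt_append (p : List Char) (c : Char) (T : Int) (k : Nat) (hk : k < p.length)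
    (h : ¬(c = '1' ∧ rrun (p.drop (k + 1)) = p.length - (k + 1))) :
    candAt (p ++ [c]) T k = candAt p T k := by
  unfold candAt
  rw [lrun_take_eq p c k (by omega)]
  rw [List.drop_append_of_le_length (by omega), rrun_append]
  rw [if_neg (by rw [List.length_drop]; exact h)]

theorem zcands_append (p : List Char) (c : Char) (T : Int) :
    zcands (p ++ [c]) T =
      (List.range p.length).filterMap
        (fun k => if p[k]? = some '0' then some (candAt (p ++ [c]) T k) else none) ++
      (if c = '0' then [min ((lrun p : Int) + 1) T] else []) := by
  unfold zcands
  rw [List.length_append, List.length_cons, List.length_nil, List.range_succ, List.filterMap_append]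
  congr 1
  · apply List.filterMap_congr
    intro k hk
    rw [List.getElem?_append_left (by simpa using List.mem_range.1 hk)]
  · rw [List.filterMap_cons, List.filterMap_nil]
    rw [List.getElem?_concat_length]
    by_cases hc : c = '0'
    · rw [if_pos (by simp [hc]), if_pos hc]
      unfold candAt
      rw [List.take_left', List.drop_eq_nil_of_le (by simp)]
      · simp [rrun_nil]
      · rfl
    · rw [if_neg (by simp [hc]), if_neg hc]

theorem zcands_append_zero (p : List Char) (T : Int) :
    zcands (p ++ ['0']) T = zcands p T ++ [min ((lrun p : Int) + 1) T] := by
  rw [zcands_append, if_pos rfl]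
  congr 1
  unfold zcands
  apply List.filterMap_congr
  intro k hk
  have hk' : k < p.length := List.mem_range.1 hk
  by_cases h0 : p[k]? = some '0'
  · rw [if_pos h0, if_pos h0, candAt_append p '0' T k hk' (by rintro ⟨h, -⟩; exact absurd h (by decide))]
  · rw [if_neg h0, if_neg h0]

theorem zcands_append_other (p : List Char) (c : Char) (T : Int) (hc1 : c ≠ '1') (hc0 : c ≠ '0') :
    zcands (p ++ [c]) T = zcands p T := by
  rw [zcands_append, if_neg hc0, List.append_nil]
  unfold zcands
  apply List.filterMap_congr
  intro k hk
  have hk' : k < p.length := List.mem_range.1 hk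
  by_cases h0 : p[k]? = some '0'
  · rw [if_pos h0, if_pos h0, candAt_append p c T k hk' (by rintro ⟨h, -⟩; exact absurd h hc1)]
  · rw [if_neg h0, if_neg h0]

theorem zero_suffix (p : List Char) (k : Nat) (hk : k < p.length) (h0 : p[k]? = some '0')
    (hall : rrun (p.drop (k + 1)) = p.length - (k + 1)) : lrun p = p.length - k - 1 := by
  have hge : p.length - k - 1 ≤ lrun p := by
    refine lrun_ge p (p.length - k - 1) (by omega) (fun j hj1 hj2 => ?_)
    have hmem : ∀ c ∈ p.drop (k + 1), c = '1' := by
      rw [← rrun_eq_length_iff]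
      simpa using hall
    have : p[j]? = (p.drop (k + 1))[j - (k + 1)]? := by
      rw [List.getElem?_drop]
      congr 1
      omega
    rw [this]
    rw [List.getElem?_eq_getElem (by simp; omega)]
    exact congrArg some (hmem _ (List.getElem_mem _))
  have hle : lrun p ≤ p.length - k - 1 := by
    refine lrun_le_of_ne p (p.length - k - 1) ?_ (by omega)
    rw [show p.length - (p.length - k - 1) - 1 = k by omega, h0]
    simp
  omega

theorem zcands_append_one_neg (p : List Char) (T : Int) (h : pendV p = -1) :
    zcands (p ++ ['1']) T = zcands p T := by
  rw [zcands_append, if_neg (by decide), List.append_nil]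
  unfold zcands
  apply List.filterMap_congr
  intro k hk
  have hk' : k < p.length := List.mem_range.1 hk
  by_cases h0 : p[k]? = some '0'
  · rw [if_pos h0, if_pos h0, candAt_append p '1' T k hk' ?_]
    rintro ⟨-, hall⟩
    have hl := zero_suffix p k hk' h0 hall
    have : 0 ≤ pendV p := by
      rw [pendV_nonneg_iff]
      constructor
      · omega
      · rw [show p.length - lrun p - 1 = k by omega]
        exact h0
    omega
  · rw [if_neg h0, if_neg h0]

theorem zcands_append_one_pos (p : List Char) (T : Int) (h : 0 ≤ pendV p) :
    ∃ u : List Int, zcands p T = u ++ [min (pendV p + (lrun p : Int) + 1) T] ∧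
      zcands (p ++ ['1']) T = u ++ [min (pendV p + (lrun p : Int) + 2) T] := by
  obtain ⟨hlen, h0⟩ := (pendV_nonneg_iff p).1 h
  set k0 := p.length - lrun p - 1 with hk0
  have hk0lt : k0 < p.length := by omega
  have hone : ∀ j, k0 < j → j < p.length → p[j]? = some '1' := by
    intro j h1 h2
    exact lrun_getElem? p j (by omega) h2
  have hval : pendV p = (lrun (p.take k0) : Int) := by
    unfold pendV
    rw [if_pos ⟨hlen, h0⟩]
  have hdlen : (p.drop (k0 + 1)).length = lrun p := by simp; omega
  have hf2 : rrun (p.drop (k0 + 1)) = lrun p := by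
    rw [← hdlen]
    rw [rrun_eq_length_iff]
    intro c hc
    obtain ⟨i, hi, rfl⟩ := List.mem_iff_getElem.1 hc
    have := hone (k0 + 1 + i) (by omega) (by simp at hi; omega)
    rw [List.getElem?_eq_getElem (by simp at hi; omega)] at this
    rw [List.getElem_drop]
    simpa using this
  have hsplit : List.range p.length =
      (List.range k0 ++ [k0]) ++ (List.range (p.length - (k0 + 1))).map (fun i => (k0 + 1) + i) := by
    rw [← List.range_succ, ← List.range_add]
    congr 1
    omega
  have htail : ∀ (g : Nat → Int) (q : List Char), q.length = p.length →
      (∀ k, k0 < k → k < p.length → q[k]? = some '1') →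
      ((List.range (p.length - (k0 + 1))).map (fun i => (k0 + 1) + i)).filterMap
        (fun k => if q[k]? = some '0' then some (g k) else none) = [] := by
    intro g q hq hones
    rw [List.filterMap_eq_nil_iff]
    intro a ha
    obtain ⟨i, hi, rfl⟩ := List.mem_map.1 ha
    have hi' := List.mem_range.1 hi
    rw [hones _ (by omega) (by omega)]
    simp
  refine ⟨(List.range k0).filterMap (fun k => if p[k]? = some '0' then some (candAt p T k) else none),
    ?_, ?_⟩
  · unfold zcands
    rw [hsplit, List.filterMap_append, List.filterMap_append]
    rw [htail _ p rfl hone, List.append_nil]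
    congr 1
    rw [List.filterMap_cons, List.filterMap_nil, if_pos h0]
    unfold candAt
    rw [hf2, hval]
  · rw [zcands_append, if_neg (by decide), List.append_nil]
    rw [hsplit, List.filterMap_append, List.filterMap_append]
    rw [htail _ p rfl hone, List.append_nil]
    congr 1
    · apply List.filterMap_congr
      intro k hk
      have hk' : k < k0 := List.mem_range.1 hk
      by_cases hz : p[k]? = some '0'
      · rw [if_pos hz, if_pos hz]
        rw [candAt_append p '1' T k (by omega) ?_]
        rintro ⟨-, hall⟩
        have := zero_suffix p k (by omega) hz hall
        omega
      · rw [if_neg hz, if_neg hz]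
    · rw [List.filterMap_cons, List.filterMap_nil, if_pos h0]
      unfold candAt
      rw [lrun_take_eq p '1' k0 (by omega), ← hval]
      rw [List.drop_append_of_le_length (by omega), rrun_append]
      rw [if_pos ⟨rfl, by rw [hf2, List.length_drop]; omega⟩, hf2]
      push_cast
      ring_nf

theorem pendV_neg (p : List Char) (h : ¬ 0 ≤ pendV p) : pendV p = -1 := by
  unfold pendV at *
  split_ifs at h ⊢ with h1
  · exfalso; exact h (by positivity)
  · rfl

theorem bfold (T : Int) (p : List Char) :
    p.foldl (fun (st : Int × Int × Int) c =>
      if c = '1' then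
        let run := st.2.2 + 1
        (if st.2.1 ≥ 0 then max st.1 (min (st.2.1 + run + 1) T) else st.1, st.2.1, run)
      else if c = '0' then
        (max st.1 (min (st.2.2 + 1) T), st.2.2, 0)
      else (st.1, -1, 0)) (0, -1, 0)
    = ((zcands p T).foldl max 0, pendV p, (lrun p : Int)) := by
  induction p using List.reverseRecOn with
  | nil => simp [zcands, pendV, lrun_nil]
  | append_singleton p c ih =>
    rw [List.foldl_append, ih, List.foldl_cons, List.foldl_nil]
    by_cases hc1 : c = '1'
    · subst hc1
      rw [if_pos rfl]
      by_cases hp : (0 : Int) ≤ pendV p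
      · obtain ⟨u, e1, e2⟩ := zcands_append_one_pos p T hp
        rw [e1, e2, List.foldl_append, List.foldl_append]
        simp only [List.foldl_cons, List.foldl_nil]
        have : pendV (p ++ ['1']) = pendV p := pendV_append_one p
        rw [this, lrun_append, if_pos rfl]
        refine Prod.ext ?_ (Prod.ext (by simp) (by push_cast; ring))
        simp only [ge_iff_le, if_pos hp]
        omega
      · have hneg := pendV_neg p hp
        rw [zcands_append_one_neg p T hneg, pendV_append_one p, lrun_append, if_pos rfl]
        refine Prod.ext ?_ (Prod.ext (by simp) (by push_cast; ring))
        simp only [ge_iff_le, if_neg hp]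
    · by_cases hc0 : c = '0'
      · subst hc0
        rw [if_neg (by decide), if_pos rfl]
        rw [zcands_append_zero, List.foldl_append, List.foldl_cons, List.foldl_nil]
        rw [pendV_append_zero, lrun_append, if_neg (by decide)]
        rfl
      · rw [if_neg hc1, if_neg hc0]
        rw [zcands_append_other p c T hc1 hc0, pendV_append_other p c hc1 hc0, lrun_append,
          if_neg hc1]
        rfl

theorem foldl_max_zero (x : Int) (hx : 0 ≤ x) (l : List Int) :
    l.foldl max x = max x (l.foldl max 0) := by
  induction l using List.reverseRecOn with
  | nil => simp; omega
  | append_singleton l a ih =>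
    rw [List.foldl_append, List.foldl_append, List.foldl_cons, List.foldl_nil,
      List.foldl_cons, List.foldl_nil, ih]
    omega

theorem lstreaks_aux (cs : List Char) (m : Nat) (hm : m ≤ cs.length) :
    (PySem.List.pyRange 0 (m : Int) 1).foldl (fun l i =>
      if PySem.List.pyGet? cs i = some '1' then l ++ [PySem.List.pyGetD l (-1) 0 + 1]
      else l ++ [0]) [0]
    = (List.range (m + 1)).map (fun k => (lrun (cs.take k) : Int)) := by
  induction m with
  | zero =>
    rw [PySem.List.pyRange_one_eq_nil (by omega), List.foldl_nil]
    simp [lrun_nil]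
  | succ m ih =>
    rw [show ((m + 1 : Nat) : Int) = (m : Int) + 1 by push_cast; ring]
    rw [PySem.List.pyRange_one_succ_right (by positivity), List.foldl_append, ih (by omega)]
    rw [List.foldl_cons, List.foldl_nil]
    have hacc : (List.range (m + 1)).map (fun k => (lrun (cs.take k) : Int)) =
        (List.range m).map (fun k => (lrun (cs.take k) : Int)) ++ [(lrun (cs.take m) : Int)] := by
      rw [List.range_succ, List.map_append]
      rfl
    have hget : PySem.List.pyGetD ((List.range (m + 1)).map (fun k => (lrun (cs.take k) : Int))) (-1) 0
        = (lrun (cs.take m) : Int) := by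
      rw [hacc]
      exact PySem.List.pyGetD_neg_one_append_singleton ..
    have htake : cs.take (m + 1) = cs.take m ++ [cs[m]] := by
      rw [List.take_add_one, List.getElem?_eq_getElem (by omega)]
      rfl
    have htarget : (List.range (m + 1 + 1)).map (fun k => (lrun (cs.take k) : Int)) =
        (List.range (m + 1)).map (fun k => (lrun (cs.take k) : Int)) ++ [(lrun (cs.take (m + 1)) : Int)] := by
      rw [List.range_succ, List.map_append]
      rfl
    rw [htarget, PySem.List.pyGet?_natCast]
    by_cases h : cs[m]? = some '1'
    · rw [if_pos h, hget]
      congr 2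
      rw [htake, lrun_append, if_pos (by
        rw [List.getElem?_eq_getElem (by omega)] at h
        simpa using h)]
      push_cast
      ring
    · rw [if_neg h]
      congr 2
      rw [htake, lrun_append, if_neg (by
        rw [List.getElem?_eq_getElem (by omega)] at h
        simpa using h)]
      simp

theorem rstreaks_aux (cs : List Char) (m : Nat) (hm : m ≤ cs.length) (acc : List Int)
    (hacc : PySem.List.pyGetD acc (-1) 0 = (rrun (cs.drop m) : Int)) :
    (PySem.List.pyRange ((m : Int) - 1) (-1) (-1)).foldl (fun r i =>
      if PySem.List.pyGet? cs i = some '1' then r ++ [PySem.List.pyGetD r (-1) 0 + 1]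
      else r ++ [0]) acc
    = acc ++ (List.range m).map (fun t => (rrun (cs.drop (m - 1 - t)) : Int)) := by
  induction m generalizing acc with
  | zero =>
    rw [show ((0 : Nat) : Int) - 1 = -1 by ring, PySem.List.pyRange_neg_one_eq_nil (by omega)]
    simp
  | succ m ih =>
    rw [show ((m + 1 : Nat) : Int) - 1 = (m : Int) by push_cast; ring]
    rw [PySem.List.pyRange_neg_one_cons (by omega), List.foldl_cons]
    have hdrop : cs.drop m = cs[m] :: cs.drop (m + 1) := List.drop_eq_getElem_cons (by omega)
    have hnew : (if PySem.List.pyGet? cs (m : Int) = some '1'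
        then acc ++ [PySem.List.pyGetD acc (-1) 0 + 1] else acc ++ [0])
        = acc ++ [(rrun (cs.drop m) : Int)] := by
      rw [PySem.List.pyGet?_natCast, hacc]
      by_cases h : cs[m]? = some '1'
      · rw [if_pos h]
        rw [List.getElem?_eq_getElem (by omega)] at h
        simp only [Option.some_inj] at h
        have hr : rrun (cs.drop m) = rrun (cs.drop (m + 1)) + 1 := by
          rw [hdrop, rrun_cons]
          split_ifs with h2
          · rfl
          · exact absurd h h2
        rw [hr]
        push_cast
        ring_nf
      · rw [if_neg h]
        rw [List.getElem?_eq_getElem (by omega)] at h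
        rw [hdrop, rrun_cons, if_neg (by simpa using h)]
        rfl
    rw [hnew]
    rw [ih (by omega) _ (by rw [PySem.List.pyGetD_neg_one_append_singleton])]
    rw [List.append_assoc]
    congr 1
    rw [List.range_succ_eq_map, List.map_cons, List.map_map]
    rw [List.singleton_append]
    congr 1
    simp
    intro a ha
    have he : m - 1 - a = m - (a + 1) := by omega
    rw [he]

theorem rstreaks_eq (cs : List Char) :
    ((PySem.List.pyRange ((cs.length : Int) - 1) (-1) (-1)).foldl (fun r i =>
      if PySem.List.pyGet? cs i = some '1' then r ++ [PySem.List.pyGetD r (-1) 0 + 1]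
      else r ++ [0]) [0]).reverse
    = (List.range (cs.length + 1)).map (fun k => (rrun (cs.drop k) : Int)) := by
  have h0 : PySem.List.pyGetD ([0] : List Int) (-1) 0 = ((rrun (cs.drop cs.length) : Nat) : Int) := by
    rw [List.drop_length, rrun_nil]
    rfl
  rw [rstreaks_aux cs cs.length (le_refl _) [0] h0]
  apply List.ext_getElem?
  intro j
  by_cases hj : j < cs.length + 1
  · have hlen : (([0] ++ (List.range cs.length).map
        (fun t => (rrun (cs.drop (cs.length - 1 - t)) : Int))) : List Int).length = cs.length + 1 := by
      simp
    rw [List.getElem?_reverse (by rw [hlen]; omega), hlen]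
    rw [List.getElem?_map, List.getElem?_range hj]
    simp only [Option.map_some]
    by_cases hj2 : j < cs.length
    · rw [List.getElem?_append_right (by simp; omega)]
      simp only [List.length_cons, List.length_nil]
      rw [List.getElem?_map, List.getElem?_range (by omega)]
      simp only [Option.map_some, Option.some_inj]
      congr 3
      omega
    · have hj3 : j = cs.length := by omega
      subst hj3
      rw [show cs.length + 1 - 1 - cs.length = 0 by omega]
      rw [List.getElem?_append_left (by simp)]
      simp [List.drop_length, rrun_nil]
  · have hlen2 : ([0] ++ (List.range cs.length).map
        (fun t => (rrun (cs.drop (cs.length - 1 - t)) : Int))).length = cs.length + 1 := by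
      simp
    rw [List.getElem?_eq_none (by rw [List.length_reverse, hlen2]; omega),
      List.getElem?_eq_none (by rw [List.length_map, List.length_range]; omega)]

theorem A_loop_aux (cs : List Char) (h1 : '1' ∈ cs) (ans : Int) (m : Nat) (hm : m ≤ cs.length) :
    (PySem.List.pyRange 0 (m : Int) 1).foldl (fun a i =>
      if PySem.List.pyGet? cs i = some '0' then
        if i - PySem.List.pyGetD ((List.range (cs.length + 1)).map
              (fun k => (lrun (cs.take k) : Int))) i 0 > PySem.Chars.find cs ['1'] then
          max a (PySem.List.pyGetD ((List.range (cs.length + 1)).map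
              (fun k => (lrun (cs.take k) : Int))) i 0 +
            PySem.List.pyGetD ((List.range (cs.length + 1)).map
              (fun k => (rrun (cs.drop k) : Int))) (i + 1) 0 + 1)
        else if i + PySem.List.pyGetD ((List.range (cs.length + 1)).map
              (fun k => (rrun (cs.drop k) : Int))) (i + 1) 0 < PySem.Chars.rfind cs ['1'] then
          max a (PySem.List.pyGetD ((List.range (cs.length + 1)).map
              (fun k => (lrun (cs.take k) : Int))) i 0 +
            PySem.List.pyGetD ((List.range (cs.length + 1)).map
              (fun k => (rrun (cs.drop k) : Int))) (i + 1) 0 + 1)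
        else
          max a (PySem.List.pyGetD ((List.range (cs.length + 1)).map
              (fun k => (lrun (cs.take k) : Int))) i 0 +
            PySem.List.pyGetD ((List.range (cs.length + 1)).map
              (fun k => (rrun (cs.drop k) : Int))) (i + 1) 0)
      else a) ans
    = ((List.range m).filterMap (fun k => if cs[k]? = some '0'
        then some (candAt cs ((cs.count '1' : Nat) : Int) k) else none)).foldl max ans := by
  induction m with
  | zero =>
    rw [PySem.List.pyRange_one_eq_nil (by omega)]
    simp
  | succ m ih =>
    have hsplit : (List.range (m + 1)).filterMap (fun k => if cs[k]? = some '0'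
          then some (candAt cs ((cs.count '1' : Nat) : Int) k) else none)
        = (List.range m).filterMap (fun k => if cs[k]? = some '0'
          then some (candAt cs ((cs.count '1' : Nat) : Int) k) else none)
          ++ (if cs[m]? = some '0' then [candAt cs ((cs.count '1' : Nat) : Int) m] else []) := by
      rw [List.range_succ, List.filterMap_append, List.filterMap_cons, List.filterMap_nil]
      by_cases h0 : cs[m]? = some '0'
      · rw [if_pos h0, if_pos h0]
      · rw [if_neg h0, if_neg h0]
    rw [show ((m + 1 : Nat) : Int) = (m : Int) + 1 by push_cast; ring]
    rw [PySem.List.pyRange_one_succ_right (by positivity), List.foldl_append, ih (by omega)]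
    rw [List.foldl_cons, List.foldl_nil, hsplit, List.foldl_append]
    rw [PySem.List.pyGet?_natCast]
    by_cases h0 : cs[m]? = some '0'
    · rw [if_pos h0, if_pos h0]
      rw [List.foldl_cons, List.foldl_nil]
      have hgetL : PySem.List.pyGetD ((List.range (cs.length + 1)).map
          (fun k => (lrun (cs.take k) : Int))) ((m : Nat) : Int) 0 = (lrun (cs.take m) : Int) := by
        rw [PySem.List.pyGetD_natCast]
        exact PySem.List.getD_map_range _ _ _ _ (by omega)
      have hgetR : PySem.List.pyGetD ((List.range (cs.length + 1)).map
          (fun k => (rrun (cs.drop k) : Int))) (((m : Nat) : Int) + 1) 0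
          = (rrun (cs.drop (m + 1)) : Int) := by
        rw [show ((m : Nat) : Int) + 1 = (((m + 1 : Nat) : Nat) : Int) by push_cast; ring]
        rw [PySem.List.pyGetD_natCast]
        exact PySem.List.getD_map_range _ _ _ _ (by omega)
      rw [hgetL, hgetR]
      obtain ⟨hle, hiff⟩ := cand_core cs m h0 h1
      by_cases hbr : ((m : Int) - (lrun (cs.take m) : Int) > PySem.Chars.find cs ['1'] ∨
          (m : Int) + (rrun (cs.drop (m + 1)) : Int) < PySem.Chars.rfind cs ['1'])
      · have hlt := hiff.1 hbr
        have hcand : candAt cs ((cs.count '1' : Nat) : Int) m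
            = (lrun (cs.take m) : Int) + (rrun (cs.drop (m + 1)) : Int) + 1 := by
          unfold candAt
          omega
        rw [hcand]
        rcases hbr with hbr | hbr
        · rw [if_pos hbr]
        · by_cases hbr1 : (m : Int) - (lrun (cs.take m) : Int) > PySem.Chars.find cs ['1']
          · rw [if_pos hbr1]
          · rw [if_neg hbr1, if_pos hbr]
      · push Not at hbr
        obtain ⟨hbr1, hbr2⟩ := hbr
        have heq : (lrun (cs.take m) : Int) + (rrun (cs.drop (m + 1)) : Int)
            = ((cs.count '1' : Nat) : Int) := by
          have := hiff.2
          omega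
        have hcand : candAt cs ((cs.count '1' : Nat) : Int) m
            = (lrun (cs.take m) : Int) + (rrun (cs.drop (m + 1)) : Int) := by
          unfold candAt
          omega
        rw [hcand, if_neg (by omega), if_neg (by omega)]
    · rw [if_neg h0, if_neg h0, List.foldl_nil]

theorem rfind_not_mem (cs : List Char) (c : Char) (h : c ∉ cs) :
    PySem.Chars.rfind cs [c] = -1 := by
  unfold PySem.Chars.rfind
  rcases rfind_go_spec cs [c] cs.length with ⟨he, -⟩ | ⟨j, -, -, hp, -⟩
  · exact he
  · rw [singleton_prefix_drop_iff] at hp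
    exact absurd (List.mem_of_getElem? hp) h

theorem main_list (cs : List Char) :
    (if PySem.Chars.isIn ['1'] cs = false then 0
     else
      (PySem.List.pyRange 0 (cs.length : Int) 1).foldl (fun a i =>
        if PySem.List.pyGet? cs i = some '0' then
          if i - PySem.List.pyGetD ((PySem.List.pyRange 0 (cs.length : Int) 1).foldl (fun l i =>
                if PySem.List.pyGet? cs i = some '1' then l ++ [PySem.List.pyGetD l (-1) 0 + 1]
                else l ++ [0]) [0]) i 0 > PySem.Chars.find cs ['1'] then
            max a (PySem.List.pyGetD ((PySem.List.pyRange 0 (cs.length : Int) 1).foldl (fun l i =>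
                if PySem.List.pyGet? cs i = some '1' then l ++ [PySem.List.pyGetD l (-1) 0 + 1]
                else l ++ [0]) [0]) i 0 +
              PySem.List.pyGetD (((PySem.List.pyRange ((cs.length : Int) - 1) (-1) (-1)).foldl (fun r i =>
                if PySem.List.pyGet? cs i = some '1' then r ++ [PySem.List.pyGetD r (-1) 0 + 1]
                else r ++ [0]) [0]).reverse) (i + 1) 0 + 1)
          else if i + PySem.List.pyGetD (((PySem.List.pyRange ((cs.length : Int) - 1) (-1) (-1)).foldl (fun r i =>
                if PySem.List.pyGet? cs i = some '1' then r ++ [PySem.List.pyGetD r (-1) 0 + 1]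
                else r ++ [0]) [0]).reverse) (i + 1) 0 < PySem.Chars.rfind cs ['1'] then
            max a (PySem.List.pyGetD ((PySem.List.pyRange 0 (cs.length : Int) 1).foldl (fun l i =>
                if PySem.List.pyGet? cs i = some '1' then l ++ [PySem.List.pyGetD l (-1) 0 + 1]
                else l ++ [0]) [0]) i 0 +
              PySem.List.pyGetD (((PySem.List.pyRange ((cs.length : Int) - 1) (-1) (-1)).foldl (fun r i =>
                if PySem.List.pyGet? cs i = some '1' then r ++ [PySem.List.pyGetD r (-1) 0 + 1]
                else r ++ [0]) [0]).reverse) (i + 1) 0 + 1)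
          else
            max a (PySem.List.pyGetD ((PySem.List.pyRange 0 (cs.length : Int) 1).foldl (fun l i =>
                if PySem.List.pyGet? cs i = some '1' then l ++ [PySem.List.pyGetD l (-1) 0 + 1]
                else l ++ [0]) [0]) i 0 +
              PySem.List.pyGetD (((PySem.List.pyRange ((cs.length : Int) - 1) (-1) (-1)).foldl (fun r i =>
                if PySem.List.pyGet? cs i = some '1' then r ++ [PySem.List.pyGetD r (-1) 0 + 1]
                else r ++ [0]) [0]).reverse) (i + 1) 0)
        else a)
        (max (PySem.Chars.find cs ['0']) ((cs.length : Int) - 1 - PySem.Chars.rfind cs ['0'])))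
    = (if ((PySem.Chars.count cs ['1'] : Nat) : Int) = 0 then 0
       else
        max (max (PySem.Chars.find cs ['0']) ((cs.length : Int) - 1 - PySem.Chars.rfind cs ['0']))
          (cs.foldl (fun (st : Int × Int × Int) c =>
            if c = '1' then
              let run := st.2.2 + 1
              (if st.2.1 ≥ 0 then
                 max st.1 (min (st.2.1 + run + 1) ((PySem.Chars.count cs ['1'] : Nat) : Int))
               else st.1, st.2.1, run)
            else if c = '0' then
              (max st.1 (min (st.2.2 + 1) ((PySem.Chars.count cs ['1'] : Nat) : Int)), st.2.2, 0)
            else (st.1, -1, 0)) (0, -1, 0)).1) := by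
  by_cases h1 : '1' ∈ cs
  · have hisin : PySem.Chars.isIn ['1'] cs = true :=
      (PySem.Chars.isIn_iff_infix ['1'] cs).2 ((singleton_infix_iff cs '1').2 h1)
    rw [hisin]
    have hcnt : PySem.Chars.count cs ['1'] = cs.count '1' := count1_eq cs '1'
    have hcntpos : 0 < cs.count '1' := List.count_pos_iff.2 h1
    rw [if_neg (by simp), if_neg (by rw [hcnt]; simp; omega)]
    have hans : 0 ≤ max (PySem.Chars.find cs ['0'])
        ((cs.length : Int) - 1 - PySem.Chars.rfind cs ['0']) := by
      by_cases h0 : '0' ∈ cs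
      · have := (PySem.Chars.find_nonneg_iff cs ['0']).2 ((singleton_infix_iff cs '0').2 h0)
        omega
      · rw [rfind_not_mem cs '0' h0]
        have hlen : 0 < cs.length := List.length_pos_of_mem h1
        have h2 : (1 : Int) ≤ (cs.length : Int) := by exact_mod_cast hlen
        omega
    rw [lstreaks_aux cs cs.length (le_refl _), rstreaks_eq cs]
    rw [A_loop_aux cs h1 _ cs.length (le_refl _)]
    rw [hcnt]
    rw [bfold ((cs.count '1' : Nat) : Int) cs]
    show ((List.range cs.length).filterMap (fun k => if cs[k]? = some '0'
        then some (candAt cs ((cs.count '1' : Nat) : Int) k) else none)).foldl max _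
      = max _ ((zcands cs ((cs.count '1' : Nat) : Int)).foldl max 0)
    rw [← foldl_max_zero _ hans]
    rfl
  · have hisin : PySem.Chars.isIn ['1'] cs = false :=
      (PySem.Chars.isIn_eq_false_iff ['1'] cs).2 (fun hc => h1 ((singleton_infix_iff cs '1').1 hc))
    rw [hisin, if_pos rfl]
    have hcnt : PySem.Chars.count cs ['1'] = cs.count '1' := count1_eq cs '1'
    have hz : cs.count '1' = 0 := List.count_eq_zero.2 h1
    rw [if_pos (by rw [hcnt, hz]; rfl)]

theorem main_eq (s : String) : solve s = solve_alt s := by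
  unfold solve solve_alt
  have hto1 : ("1" : String).toList = ['1'] := rfl
  have hto0 : ("0" : String).toList = ['0'] := rfl
  simp only [PySem.Str.len_eq, PySem.Str.pyGet?_eq, PySem.Chars.pyGet?_eq_listPyGet?,
    PySem.Str.find, PySem.Str.rfind, PySem.Str.isIn, PySem.Str.count_eq, hto1, hto0]
  exact main_list s.toList

-- ===== VERDICT (by name: the statement is the Claim_ definition above) =====
theorem solve_spec : Claim_equal_solve := by
  intro s _
  unfold Spec_solve
  exact main_eq s
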